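-- pv_equiv track=rewrite | github.com/1arie1/ctac | src/ctac/eval/value_format.py | _format_dec_10k
-- ===== SOURCE A (Python) =====
-- def _format_dec_10k(n: int) -> str:
--     sign = "-" if n < 0 else ""
--     s = str(abs(n))
--     if len(s) <= 4:
--         return f"{sign}{s}"
--     parts: list[str] = []
--     while s:
--         parts.append(s[-4:])
--         s = s[:-4]
--     parts.reverse()
--     return sign + "_".join(parts)
-- ===== SOURCE B (Python) =====
-- def _format_dec_10k(n: int) -> str:
--     sign = "-" if n < 0 else ""
--     s = str(abs(n))
--     first = len(s) % 4 or 4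
--     parts = [s[:first]] + [s[i:i + 4] for i in range(first, len(s), 4)]
--     return sign + "_".join(parts)
-- ===== Notes on version B (the rewrite author's own statement) =====
-- stated objective: simpler
-- what changed: Instead of repeatedly peeling the last four characters off the digit string in a while loop and reversing the collected parts, B computes the leading group's length with a modulus up front and builds all four-digit groups left-to-right in one comprehension.
import Mathlib
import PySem

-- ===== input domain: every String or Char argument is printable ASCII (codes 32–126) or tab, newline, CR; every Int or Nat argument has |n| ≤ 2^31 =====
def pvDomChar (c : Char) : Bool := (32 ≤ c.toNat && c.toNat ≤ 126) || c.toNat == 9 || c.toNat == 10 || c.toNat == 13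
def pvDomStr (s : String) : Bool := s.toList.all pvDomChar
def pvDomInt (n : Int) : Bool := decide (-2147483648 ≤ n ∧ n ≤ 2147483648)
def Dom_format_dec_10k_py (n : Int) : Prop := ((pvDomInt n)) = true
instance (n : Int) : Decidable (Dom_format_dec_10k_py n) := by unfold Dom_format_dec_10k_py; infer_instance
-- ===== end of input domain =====

-- B groups the digit string left-to-right (leading group length = len % 4 or 4) in one
-- comprehension, instead of A's while loop peeling the last four characters and reversing.

-- ===== PORT A =====
-- termination helper for A's while loop: s[:-4] is strictly shorter than a nonempty s
theorem pvSliceDrop4_lt (s : List Char) (hs : s ≠ []) :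
    (PySem.List.slice s none (some (-4))).length < s.length := by
  rw [PySem.List.slice_to_neg_ofNat s 4 (by norm_num)]
  have := List.length_pos_iff.mpr hs
  simp [List.length_take]
  omega

-- while s: parts.append(s[-4:]); s = s[:-4]
def pvChunkA (s : List Char) (parts : List (List Char)) : List (List Char) :=
  if hs : s = [] then parts
  else pvChunkA (PySem.List.slice s none (some (-4)))
                (parts ++ [PySem.List.slice s (some (-4)) none])
termination_by s.length
decreasing_by exact pvSliceDrop4_lt s hs

def format_dec_10k_py (n : Int) : String :=
  let sign : List Char := if n < 0 then ['-'] else []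
  let s : List Char := PySem.Int.toChars |n|
  if PySem.Chars.len s ≤ 4 then String.ofList (sign ++ s)
  else String.ofList (sign ++ PySem.Chars.join ['_'] (pvChunkA s []).reverse)

-- ===== PORT B =====
def format_dec_10k_py_alt (n : Int) : String :=
  let sign : List Char := if n < 0 then ['-'] else []
  let s : List Char := PySem.Int.toChars |n|
  let m : Int := PySem.Int.mod (PySem.Chars.len s) 4
  let first : Int := if m = 0 then 4 else m          -- len(s) % 4 or 4
  let parts : List (List Char) :=
    PySem.List.slice s none (some first) ::
      (PySem.List.pyRange first (PySem.Chars.len s) 4).map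
        (fun i => PySem.List.slice s (some i) (some (i + 4)))
  String.ofList (sign ++ PySem.Chars.join ['_'] parts)

-- ===== PRECONDITION & SPEC =====
def Spec_format_dec_10k_py (n : Int) (out : String) : Prop := out = format_dec_10k_py_alt n
instance (n : Int) (out : String) : Decidable (Spec_format_dec_10k_py n out) := by unfold Spec_format_dec_10k_py; infer_instance

-- ===== CLAIM (what is proved, stated in full; the proofs are below) =====
def Claim_equal_format_dec_10k_py : Prop := ∀ (n : Int), Dom_format_dec_10k_py n → Spec_format_dec_10k_py n (format_dec_10k_py n)

-- ===== LEMMAS AND PROOFS =====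

-- str(m) is never the empty string
theorem pvToDigitsCore_ne_nil (b f n : Nat) (acc : List Char) (h : f = 0 → acc ≠ []) :
    Nat.toDigitsCore b f n acc ≠ [] := by
  induction f generalizing n acc with
  | zero => exact h rfl
  | succ f ih =>
    unfold Nat.toDigitsCore
    simp only
    split
    · simp
    · exact ih (n / b) ((n % b).digitChar :: acc) (fun _ => by simp)

theorem pvToChars_ne_nil (m : Int) : PySem.Int.toChars m ≠ [] := by
  unfold PySem.Int.toChars Nat.toDigits
  split
  · simp
  · exact pvToDigitsCore_ne_nil 10 _ _ [] (by simp)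

-- the length of the leading group in B's decomposition
def pvFirst (L : Nat) : Nat := if L % 4 = 0 then 4 else L % 4

-- B's list of groups, in plain take/drop form
def pvPartsB (s : List Char) : List (List Char) :=
  s.take (pvFirst s.length) ::
    (List.range ((s.length - pvFirst s.length) / 4)).map
      (fun k => (s.drop (pvFirst s.length + 4 * k)).take 4)

theorem pvChunkA_acc (s : List Char) (parts : List (List Char)) :
    pvChunkA s parts = parts ++ pvChunkA s [] := by
  induction hL : s.length using Nat.strong_induction_on generalizing s parts with
  | _ L ih =>
  subst hL
  by_cases hs : s = []
  · subst hs
    rw [pvChunkA]; simp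
    rw [pvChunkA]; simp
  · conv_lhs => rw [pvChunkA]
    conv_rhs => rw [pvChunkA]
    simp only [dif_neg hs]
    rw [ih _ (pvSliceDrop4_lt s hs) _ (parts ++ [PySem.List.slice s (some (-4)) none]) rfl,
        ih _ (pvSliceDrop4_lt s hs) _ ([] ++ [PySem.List.slice s (some (-4)) none]) rfl]
    simp

theorem pvChunkA_cons (s : List Char) (hs : s ≠ []) :
    pvChunkA s [] =
      List.drop (s.length - 4) s :: pvChunkA (List.take (s.length - 4) s) [] := by
  rw [pvChunkA]
  simp only [dif_neg hs]
  rw [pvChunkA_acc,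
      PySem.List.slice_to_neg_ofNat s 4 (by norm_num),
      PySem.List.slice_from_neg_ofNat s 4 (by norm_num)]
  simp

theorem pvFirst_sub4 (L : Nat) (hL : 5 ≤ L) : pvFirst (L - 4) = pvFirst L := by
  unfold pvFirst
  split_ifs <;> omega

theorem pvFirst_le (L : Nat) (hL : 5 ≤ L) : pvFirst L ≤ L - 4 := by
  unfold pvFirst; split_ifs <;> omega

theorem pvFirst_dvd (L : Nat) (hL : 1 ≤ L) : 4 ∣ (L - pvFirst L) := by
  unfold pvFirst; split_ifs <;> omega

theorem pvChunkA_rev (s : List Char) (hs : s ≠ []) :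
    (pvChunkA s []).reverse = pvPartsB s := by
  induction hL : s.length using Nat.strong_induction_on generalizing s with
  | _ L ih =>
  subst hL
  have hpos : 0 < s.length := List.length_pos_iff.mpr hs
  rw [pvChunkA_cons s hs]
  by_cases h4 : s.length ≤ 4
  · -- s[:-4] is empty, single chunk [s]
    have ht : s.length - 4 = 0 := by omega
    rw [ht]
    simp only [List.take_zero, List.drop_zero]
    rw [pvChunkA]
    unfold pvPartsB pvFirst
    have : (if s.length % 4 = 0 then 4 else s.length % 4) = s.length := by
      split_ifs <;> omega
    rw [this]
    simp
  · -- peel the last four characters, recurse on s' = s[:-4]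
    set L := s.length with hLdef
    have hL5 : 5 ≤ L := by omega
    set s' := List.take (L - 4) s with hs'
    have hlen' : s'.length = L - 4 := by
      rw [hs', List.length_take]; omega
    have hne' : s' ≠ [] := by
      intro h; rw [h] at hlen'; simp at hlen'; omega
    rw [List.reverse_cons, ih s'.length (by omega) s' hne' rfl]
    set f := pvFirst L with hf
    have hfL : f = pvFirst s'.length := by rw [hlen', pvFirst_sub4 L hL5]
    have hfle : f ≤ L - 4 := pvFirst_le L hL5
    have hdvd : 4 ∣ (L - f) := pvFirst_dvd L (by omega)
    obtain ⟨q, hq⟩ : ∃ q, L - f = 4 * q := hdvd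
    have hq1 : 1 ≤ q := by omega
    unfold pvPartsB
    rw [← hfL, hlen']
    rw [show (L - 4 - f) / 4 = q - 1 by omega,
        show (s.length - pvFirst s.length) / 4 = q by rw [← hLdef, ← hf]; omega,
        ← hLdef, ← hf]
    have hhead : s'.take f = s.take f := by
      rw [hs', List.take_take]
      congr 1; omega
    have htail :
        (List.range (q - 1)).map (fun k => (s'.drop (f + 4 * k)).take 4) ++
            [List.drop (L - 4) s] =
        (List.range q).map (fun k => (s.drop (f + 4 * k)).take 4) := by
      rw [show q = (q - 1) + 1 by omega, List.range_succ, List.map_append]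
      congr 1
      · apply List.map_congr_left
        intro k hk
        rw [List.mem_range] at hk
        rw [hs', List.drop_take, List.take_take]
        congr 1
        omega
      · simp only [List.map_cons, List.map_nil]
        congr 1
        rw [show f + 4 * (q - 1) = L - 4 by omega]
        rw [List.take_of_length_le (by rw [List.length_drop]; omega)]
    rw [hhead] at *
    simp only [List.cons_append]
    rw [htail]

-- B's port-level parts equal pvPartsB (PySem slices/ranges in plain form)
theorem pvPartsB_port (s : List Char) (hs : s ≠ []) :
    (PySem.List.slice s none
        (some (if PySem.Int.mod (PySem.Chars.len s) 4 = 0 then 4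
               else PySem.Int.mod (PySem.Chars.len s) 4)) ::
      (PySem.List.pyRange
          (if PySem.Int.mod (PySem.Chars.len s) 4 = 0 then 4
           else PySem.Int.mod (PySem.Chars.len s) 4)
          (PySem.Chars.len s) 4).map
        (fun i => PySem.List.slice s (some i) (some (i + 4)))) = pvPartsB s := by
  have hpos : 0 < s.length := List.length_pos_iff.mpr hs
  have hmod : PySem.Int.mod (PySem.Chars.len s) 4 = ((s.length : Int) % 4) := by
    simp [PySem.Int.mod, Int.fmod_eq_emod, PySem.Chars.len_eq]
  have hfirst :
      (if PySem.Int.mod (PySem.Chars.len s) 4 = 0 then 4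
       else PySem.Int.mod (PySem.Chars.len s) 4) = ((pvFirst s.length : Nat) : Int) := by
    rw [hmod]; unfold pvFirst
    split_ifs with h1 h2 h2 <;> push_cast <;> omega
  rw [hfirst]
  set f := pvFirst s.length with hf
  have hf1 : 1 ≤ f := by unfold pvFirst at hf; rw [hf]; split_ifs <;> omega
  have hfle : f ≤ s.length := by unfold pvFirst at hf; rw [hf]; split_ifs <;> omega
  have hdvd : 4 ∣ (s.length - f) := pvFirst_dvd s.length (by omega)
  obtain ⟨q, hq⟩ : ∃ q, s.length - f = 4 * q := hdvd
  unfold pvPartsB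
  rw [← hf]
  congr 1
  · exact PySem.List.slice_to_natCast s f
  · rw [PySem.List.pyRange_of_pos _ _ (by norm_num)]
    have hlen : PySem.Chars.len s = (s.length : Int) := by
      simp [PySem.Chars.len_eq]
    rw [hlen]
    have hcount :
        (if (f : Int) < (s.length : Int) then
            (((s.length : Int) - f + 4 - 1) / 4).toNat else 0) = q := by
      split_ifs with h
      · omega
      · omega
    rw [hcount, List.map_map, show (s.length - f) / 4 = q by omega]
    apply List.map_congr_left
    intro k hk
    rw [List.mem_range] at hk
    simp only [Function.comp_apply]
    rw [PySem.List.slice_toNat s (by positivity) (by positivity)]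
    congr 1 <;> omega

-- ===== VERDICT (by name: the statement is the Claim_ definition above) =====
theorem format_dec_10k_py_spec : Claim_equal_format_dec_10k_py := by
  intro n _
  unfold Spec_format_dec_10k_py format_dec_10k_py format_dec_10k_py_alt
  simp only
  set s := PySem.Int.toChars |n| with hsdef
  have hs : s ≠ [] := pvToChars_ne_nil |n|
  have hpos : 0 < s.length := List.length_pos_iff.mpr hs
  rw [pvPartsB_port s hs]
  by_cases h4 : PySem.Chars.len s ≤ 4
  · -- short string: B's group list is just [s]
    rw [if_pos h4]
    have hlen4 : s.length ≤ 4 := by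
      have : PySem.Chars.len s = (s.length : Int) := by
        simp [PySem.Chars.len_eq]
      omega
    have : pvPartsB s = [s] := by
      unfold pvPartsB pvFirst
      have h1 : (if s.length % 4 = 0 then 4 else s.length % 4) = s.length := by
        split_ifs <;> omega
      rw [h1]
      simp
    rw [this, PySem.Chars.join_singleton]
  · rw [if_neg h4, pvChunkA_rev s hs]
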